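-- pv_equiv track=rewrite | github.com/alantao5056/USACO | ch_1/1.3/1.3.3-Transformations/Practice/Combination/isCombination.py | isCombination
-- ===== SOURCE A (Python) =====
-- def isCombination(n: int, original: list, transformed: list) -> bool:
--   rotate_90 = True
--   rotate_180 = True
--   rotate_270 = True
--   for i in range(0, n):
--     for j in range(0, n):
--       iReflect = i
--       jReflect = n - j - 1
--       if original[i][j] != transformed[jReflect][n - iReflect - 1] and rotate_90 == True:
--         rotate_90 = False
--       if original[i][j] != transformed[n - iReflect - 1][n - jReflect - 1] and rotate_180 == True:
--         rotate_180 = False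
--       if original[i][j] != transformed[n - jReflect - 1][iReflect] and rotate_270 == True:
--         rotate_270 = False
--       if rotate_90 == False and rotate_180 == False and rotate_270 == False:
--         return False
--   if rotate_90 == True or rotate_180 == True or rotate_270 == True:
--     return True
-- ===== SOURCE B (Python) =====
-- def isCombination(n: int, original: list, transformed: list) -> bool:
--   r = range(0, n)
--   orig = [[original[i][j] for j in r] for i in r]
--   c90  = [[transformed[n - j - 1][n - i - 1] for j in r] for i in r]
--   c180 = [[transformed[n - i - 1][j] for j in r] for i in r]
--   c270 = [[transformed[j][i] for j in r] for i in r]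
--   return orig == c90 or orig == c180 or orig == c270
-- ===== Notes on version B (the rewrite author's own statement) =====
-- stated objective: simpler
-- what changed: B materializes the three candidate grids (using A's exact index maps) and the truncated original and compares them with whole-grid list equality, replacing A's fused per-cell scan with three running flags and an early exit.
-- outside the precondition, e.g. on isCombination(2, [['a', 'b'], ['c']], [['x', 'x'], ['x', 'x']]): A returns False, B raises IndexError
import Mathlib
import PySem

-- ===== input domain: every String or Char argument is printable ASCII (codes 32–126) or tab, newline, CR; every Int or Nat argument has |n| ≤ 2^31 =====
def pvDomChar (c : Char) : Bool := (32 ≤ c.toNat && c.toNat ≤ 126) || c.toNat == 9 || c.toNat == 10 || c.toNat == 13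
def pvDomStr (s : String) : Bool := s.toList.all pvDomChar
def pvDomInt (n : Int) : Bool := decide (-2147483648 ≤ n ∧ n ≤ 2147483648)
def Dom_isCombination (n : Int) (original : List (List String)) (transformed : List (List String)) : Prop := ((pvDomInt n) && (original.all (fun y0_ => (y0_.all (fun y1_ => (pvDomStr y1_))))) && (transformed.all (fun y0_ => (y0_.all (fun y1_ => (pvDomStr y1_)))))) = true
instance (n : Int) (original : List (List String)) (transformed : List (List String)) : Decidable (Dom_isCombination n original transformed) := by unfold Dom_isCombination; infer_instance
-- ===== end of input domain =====

-- B replaces A's fused per-cell scan with three running flags and early exit by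
-- materializing the three candidate grids (same index maps) plus the truncated
-- original and comparing them with whole-grid list equality (objective: simpler).

-- grid indexing m[a][b]; default only reached outside Pre_ (where Python raises IndexError)
def pvCell (m : List (List String)) (a b : Int) : String :=
  PySem.List.pyGetD (PySem.List.pyGetD m a []) b ""

-- ===== PORT A =====
-- inner 'for j in range(0, n)' loop; 'none' = the early 'return False'
def pvLoopJ (n i : Int) (original transformed : List (List String)) :
    List Int → Bool × Bool × Bool → Option (Bool × Bool × Bool)
  | [], st => some st
  | j :: js, (r90, r180, r270) =>
    let jReflect := n - j - 1
    let r90' := if pvCell original i j ≠ pvCell transformed jReflect (n - i - 1) ∧ r90 = true then false else r90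
    let r180' := if pvCell original i j ≠ pvCell transformed (n - i - 1) (n - jReflect - 1) ∧ r180 = true then false else r180
    let r270' := if pvCell original i j ≠ pvCell transformed (n - jReflect - 1) i ∧ r270 = true then false else r270
    if r90' = false ∧ r180' = false ∧ r270' = false then none
    else pvLoopJ n i original transformed js (r90', r180', r270')

-- outer 'for i in range(0, n)' loop; the [] case is the final 'if … : return True'
-- (its fallthrough is unreachable in Python: the early return fires as soon as all flags are False)
def pvLoopI (n : Int) (original transformed : List (List String)) :
    List Int → Bool × Bool × Bool → Bool
  | [], (r90, r180, r270) => if r90 = true ∨ r180 = true ∨ r270 = true then true else false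
  | i :: is, st =>
    match pvLoopJ n i original transformed (PySem.List.pyRange 0 n 1) st with
    | none => false
    | some st' => pvLoopI n original transformed is st'

def isCombination (n : Int) (original : List (List String)) (transformed : List (List String)) : Bool :=
  pvLoopI n original transformed (PySem.List.pyRange 0 n 1) (true, true, true)

-- ===== PORT B =====
def isCombination_alt (n : Int) (original : List (List String)) (transformed : List (List String)) : Bool :=
  let r := PySem.List.pyRange 0 n 1
  let orig := r.map (fun i => r.map (fun j => pvCell original i j))
  let c90  := r.map (fun i => r.map (fun j => pvCell transformed (n - j - 1) (n - i - 1)))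
  let c180 := r.map (fun i => r.map (fun j => pvCell transformed (n - i - 1) j))
  let c270 := r.map (fun i => r.map (fun j => pvCell transformed j i))
  (orig == c90) || (orig == c180) || (orig == c270)

-- ===== PRECONDITION & SPEC =====
-- Pre_ excludes inputs where an accessed row or cell is missing: there Python A raises
-- IndexError, except on some ragged grids where its early exit returns False before the
-- missing cell — a scan-order artefact; B (which builds full candidate grids) raises there.
def Pre_isCombination (n : Int) (original : List (List String)) (transformed : List (List String)) : Prop :=
  n ≤ original.length ∧ n ≤ transformed.length ∧
  (∀ row ∈ original.take n.toNat, n ≤ row.length) ∧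
  (∀ row ∈ transformed.take n.toNat, n ≤ row.length)
instance (n : Int) (original : List (List String)) (transformed : List (List String)) : Decidable (Pre_isCombination n original transformed) := by unfold Pre_isCombination; infer_instance
def pvWitness_isCombination : Int × List (List String) × List (List String) := (2, [["a","b"],["c","d"]], [["d","b"],["c","a"]])

def Spec_isCombination (n : Int) (original : List (List String)) (transformed : List (List String)) (out : Bool) : Prop := out = isCombination_alt n original transformed
instance (n : Int) (original : List (List String)) (transformed : List (List String)) (out : Bool) : Decidable (Spec_isCombination n original transformed out) := by unfold Spec_isCombination; infer_instance

-- ===== CLAIM (what is proved, stated in full; the proofs are below) =====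
def Claim_equal_isCombination : Prop := ∀ (n : Int) (original : List (List String)) (transformed : List (List String)), Dom_isCombination n original transformed → Pre_isCombination n original transformed → Spec_isCombination n original transformed (isCombination n original transformed)

-- ===== LEMMAS AND PROOFS =====

-- per-cell agreement tests, shared by both characterizations
def pvE90 (n : Int) (original transformed : List (List String)) (i j : Int) : Bool :=
  pvCell original i j == pvCell transformed (n - j - 1) (n - i - 1)
def pvE180 (n : Int) (original transformed : List (List String)) (i j : Int) : Bool :=
  pvCell original i j == pvCell transformed (n - i - 1) j
def pvE270 (n : Int) (original transformed : List (List String)) (i j : Int) : Bool :=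
  pvCell original i j == pvCell transformed j i

lemma pvLoopJ_char (n i : Int) (O T : List (List String)) (js : List Int) :
    ∀ a b c : Bool, (a || b || c) = true →
    pvLoopJ n i O T js (a, b, c) =
      (if (a && js.all (pvE90 n O T i)) || (b && js.all (pvE180 n O T i)) || (c && js.all (pvE270 n O T i))
       then some (a && js.all (pvE90 n O T i), b && js.all (pvE180 n O T i), c && js.all (pvE270 n O T i))
       else none) := by
  induction js with
  | nil => intro a b c h; simp [pvLoopJ, h]
  | cons j js ih =>
    intro a b c h
    have h90 : (if pvCell O i j ≠ pvCell T (n - j - 1) (n - i - 1) ∧ a = true then false else a)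
        = (a && pvE90 n O T i j) := by
      by_cases hs : pvCell O i j = pvCell T (n - j - 1) (n - i - 1) <;> cases a <;>
        simp [pvE90, hs]
    have h180 : (if pvCell O i j ≠ pvCell T (n - i - 1) (n - (n - j - 1) - 1) ∧ b = true then false else b)
        = (b && pvE180 n O T i j) := by
      have hj : n - (n - j - 1) - 1 = j := by ring
      rw [hj]
      by_cases hs : pvCell O i j = pvCell T (n - i - 1) j <;> cases b <;>
        simp [pvE180, hs]
    have h270 : (if pvCell O i j ≠ pvCell T (n - (n - j - 1) - 1) i ∧ c = true then false else c)
        = (c && pvE270 n O T i j) := by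
      have hj : n - (n - j - 1) - 1 = j := by ring
      rw [hj]
      by_cases hs : pvCell O i j = pvCell T j i <;> cases c <;>
        simp [pvE270, hs]
    simp only [pvLoopJ, h90, h180, h270]
    by_cases hz : (a && pvE90 n O T i j) = false ∧ (b && pvE180 n O T i j) = false ∧ (c && pvE270 n O T i j) = false
    · rw [if_pos hz]
      obtain ⟨h1, h2, h3⟩ := hz
      simp only [List.all_cons, ← Bool.and_assoc, h1, h2, h3, Bool.false_and, Bool.or_self]
      simp
    · rw [if_neg hz]
      have hor : ((a && pvE90 n O T i j) || (b && pvE180 n O T i j) || (c && pvE270 n O T i j)) = true := by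
        cases hx : (a && pvE90 n O T i j) <;> cases hy : (b && pvE180 n O T i j) <;>
          cases hw : (c && pvE270 n O T i j) <;> simp_all
      rw [ih _ _ _ hor]
      simp only [List.all_cons, ← Bool.and_assoc]

lemma pvLoopI_char (n : Int) (O T : List (List String)) (is : List Int) :
    ∀ a b c : Bool, (a || b || c) = true →
    pvLoopI n O T is (a, b, c) =
      ((a && is.all (fun i => (PySem.List.pyRange 0 n 1).all (pvE90 n O T i))) ||
       (b && is.all (fun i => (PySem.List.pyRange 0 n 1).all (pvE180 n O T i))) ||
       (c && is.all (fun i => (PySem.List.pyRange 0 n 1).all (pvE270 n O T i)))) := by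
  induction is with
  | nil =>
    intro a b c h
    cases a <;> cases b <;> cases c <;> simp_all <;> rfl
  | cons i is ih =>
    intro a b c h
    simp only [pvLoopI]
    rw [pvLoopJ_char n i O T _ a b c h]
    set A1 := (PySem.List.pyRange 0 n 1).all (pvE90 n O T i) with hA1
    set B1 := (PySem.List.pyRange 0 n 1).all (pvE180 n O T i) with hB1
    set C1 := (PySem.List.pyRange 0 n 1).all (pvE270 n O T i) with hC1
    by_cases hor : ((a && A1) || (b && B1) || (c && C1)) = true
    · rw [if_pos hor]
      show pvLoopI n O T is (a && A1, b && B1, c && C1) = _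
      rw [ih _ _ _ hor]
      simp only [List.all_cons, ← Bool.and_assoc, ← hA1, ← hB1, ← hC1]
    · rw [if_neg hor]
      show false = _
      simp only [Bool.or_eq_true, not_or, Bool.not_eq_true] at hor
      obtain ⟨⟨h1, h2⟩, h3⟩ := hor
      simp only [List.all_cons, ← Bool.and_assoc, ← hA1, ← hB1, ← hC1, h1, h2, h3,
        Bool.false_and, Bool.or_self]

lemma pvMapBeq {α β : Type} [BEq β] [LawfulBEq β] (l : List α) (f g : α → β) :
    (l.map f == l.map g) = l.all (fun x => f x == g x) := by
  rw [Bool.eq_iff_iff]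
  simp [List.map_inj_left, List.all_eq_true]

-- ===== VERDICT (by name: the statement is the Claim_ definition above) =====
theorem isCombination_spec : Claim_equal_isCombination := by
  intro n O T _ _
  unfold Spec_isCombination isCombination isCombination_alt
  rw [pvLoopI_char n O T _ true true true rfl]
  simp only [Bool.true_and, pvMapBeq]
  rfl
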